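-- pv_equiv track=rewrite | github.com/bubbleblue0/Scalable-Counterfactual-Explanations-for-Time-Series-via-Policy-Learning | Policy_learning_CF/utils.py | get_segmentsNumber
-- ===== SOURCE A (Python) =====
-- def get_segmentsNumber(l4):
--     flag, count = 0,0
--     for i in range(len(l4)):
--         if l4[i:i+1][0]!=0:
--             flag=1
--         if flag==1 and l4[i:i+1][0]==0:
--             count= count+1
--             flag=0
--     return count
-- ===== SOURCE B (Python) =====
-- def get_segmentsNumber(l4):
--     return sum(1 for a, b in zip(l4, l4[1:]) if a != 0 and b == 0)
-- ===== Notes on version B (the rewrite author's own statement) =====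
-- stated objective: simpler
-- what changed: Replaces the indexed flag/count state machine with a stateless one-liner counting adjacent nonzero-to-zero pairs over zip(l4, l4[1:]).
import Mathlib
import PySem

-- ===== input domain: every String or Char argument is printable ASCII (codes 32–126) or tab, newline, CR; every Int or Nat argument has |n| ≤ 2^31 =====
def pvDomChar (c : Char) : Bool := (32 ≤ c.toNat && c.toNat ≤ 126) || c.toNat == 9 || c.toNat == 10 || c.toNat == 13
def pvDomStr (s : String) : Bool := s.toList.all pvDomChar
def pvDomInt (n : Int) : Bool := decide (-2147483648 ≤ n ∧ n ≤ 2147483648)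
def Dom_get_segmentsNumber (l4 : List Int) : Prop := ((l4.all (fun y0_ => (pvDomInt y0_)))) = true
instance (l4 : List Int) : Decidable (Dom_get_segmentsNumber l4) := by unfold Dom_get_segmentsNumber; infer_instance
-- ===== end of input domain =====

-- B replaces A's indexed flag/count state machine by a stateless count of
-- adjacent nonzero→zero pairs (objective: simpler); same results on all inputs.

-- ===== PORT A =====
-- literal port of A: loop over range(len(l4)), reading l4[i:i+1][0] each time;
-- the slice is always nonempty here, so pyGetD's default 0 is never used
def get_segmentsNumber (l4 : List Int) : Int :=
  (PySem.List.pyRange 0 (l4.length : Int) 1).foldl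
    (fun (st : Int × Int) i =>
      let x := PySem.List.pyGetD (PySem.List.slice l4 (some i) (some (i + 1))) 0 0
      let flag := if x ≠ 0 then 1 else st.1
      if flag = 1 ∧ x = 0 then (0, st.2 + 1) else (flag, st.2))
    (0, 0) |>.2

-- ===== PORT B =====
-- port of Source B: count the pairs (a, b) of zip(l4, l4[1:]) with a != 0 and b == 0
def get_segmentsNumber_alt (l4 : List Int) : Int :=
  (((l4.zip (l4.drop 1)).filter (fun p => p.1 ≠ 0 ∧ p.2 = 0)).length : Int)

-- ===== PRECONDITION & SPEC =====
def Spec_get_segmentsNumber (l4 : List Int) (out : Int) : Prop := out = get_segmentsNumber_alt l4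
instance (l4 : List Int) (out : Int) : Decidable (Spec_get_segmentsNumber l4 out) := by unfold Spec_get_segmentsNumber; infer_instance

-- ===== CLAIM (what is proved, stated in full; the proofs are below) =====
def Claim_equal_get_segmentsNumber : Prop := ∀ (l4 : List Int), Dom_get_segmentsNumber l4 → Spec_get_segmentsNumber l4 (get_segmentsNumber l4)

-- ===== LEMMAS AND PROOFS =====

-- A's loop body, on the element itself
def pvStep (st : Int × Int) (x : Int) : Int × Int :=
  let flag := if x ≠ 0 then 1 else st.1
  if flag = 1 ∧ x = 0 then (0, st.2 + 1) else (flag, st.2)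

-- the count A's loop adds when entered with flag `flag`
def pvPairs (flag : Int) : List Int → Int
  | [] => 0
  | x :: xs => (if flag = 1 ∧ x = 0 then 1 else 0) + pvPairs (if x ≠ 0 then 1 else 0) xs

theorem pvStep_eq (flag count x : Int) (hf : flag = 0 ∨ flag = 1) :
    pvStep (flag, count) x =
      ((if x ≠ 0 then 1 else 0), count + (if flag = 1 ∧ x = 0 then 1 else 0)) := by
  rcases hf with h | h <;> subst h <;> by_cases hx : x = 0 <;>
    simp [pvStep, hx]

theorem pvFold_eq (l4 : List Int) : ∀ (flag count : Int), flag = 0 ∨ flag = 1 →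
    (l4.foldl pvStep (flag, count)).2 = count + pvPairs flag l4 := by
  induction l4 with
  | nil => intro flag count _; simp [pvPairs]
  | cons x xs ih =>
    intro flag count hf
    rw [List.foldl_cons, pvStep_eq flag count x hf,
      ih _ _ (by by_cases hx : x = 0 <;> simp [hx]), pvPairs]
    ring

theorem pvPairs_zip (xs : List Int) : ∀ (x : Int),
    pvPairs (if x ≠ 0 then 1 else 0) xs =
      ((((x :: xs).zip xs).filter (fun p => p.1 ≠ 0 ∧ p.2 = 0)).length : Int) := by
  induction xs with
  | nil => intro x; simp [pvPairs]
  | cons y ys ih =>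
    intro x
    rw [pvPairs, ih y]
    by_cases hx : x = 0 <;> by_cases hy : y = 0 <;>
      simp [hx, hy]; ring

-- ===== VERDICT (by name: the statement is the Claim_ definition above) =====
theorem get_segmentsNumber_spec : Claim_equal_get_segmentsNumber := by
  intro l4 _
  unfold Spec_get_segmentsNumber get_segmentsNumber get_segmentsNumber_alt
  -- replace the slice-read by a direct indexed read, then the range loop by a list fold
  have hcongr := PySem.List.foldl_congr_mem (PySem.List.pyRange 0 (l4.length : Int) 1)
    (fun (st : Int × Int) i =>
      let x := PySem.List.pyGetD (PySem.List.slice l4 (some i) (some (i + 1))) 0 0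
      let flag := if x ≠ 0 then 1 else st.1
      if flag = 1 ∧ x = 0 then (0, st.2 + 1) else (flag, st.2))
    (fun st i => pvStep st (PySem.List.pyGetD l4 i 0)) (0, 0)
    (by
      intro st i hi
      rw [PySem.List.mem_pyRange_one] at hi
      have h0 : (0 : Int) ≤ i := hi.1
      have hlt : i.toNat < l4.length := by omega
      have hx : PySem.List.pyGetD (PySem.List.slice l4 (some i) (some (i + 1))) 0 0 =
          PySem.List.pyGetD l4 i 0 := by
        rw [PySem.List.slice_toNat _ h0 (by omega), PySem.List.pyGetD_zero,
          PySem.List.pyGetD_eq_getElem _ _ h0 (by omega)]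
        have : (i + 1).toNat - i.toNat = 1 := by omega
        rw [this]
        simp [List.getD, List.getElem?_eq_getElem hlt]
      simp only [hx]
      rfl)
  rw [hcongr, PySem.List.foldl_pyRange_zero_pyGetD' l4 0 pvStep (0, 0),
    pvFold_eq l4 0 0 (Or.inl rfl)]
  cases l4 with
  | nil => simp [pvPairs]
  | cons x xs =>
    rw [show pvPairs 0 (x :: xs) = pvPairs (if x ≠ 0 then 1 else 0) xs by
        simp [pvPairs], pvPairs_zip xs x]
    simp
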